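-- pv_equiv track=rewrite | github.com/Animatic-AI-Solutions/kingstons_portal | backend/migration_tools/ast_route_migrator.py | _convert_path
-- ===== SOURCE A (Python) =====
-- def _convert_path(path: str) -> str:
--     """
--     Convert underscore path to hyphenated format.
--     Preserves path parameters like {id}.
--     """
--     segments = path.split("/")
--     converted_segments = []
--
--     for segment in segments:
--         # Skip empty segments
--         if not segment:
--             converted_segments.append(segment)
--             continue
--
--         # Preserve path parameters {id}, {client_group_id}, etc.
--         if segment.startswith("{") and segment.endswith("}"):
--             # Convert parameter name inside braces
--             param_name = segment[1:-1]
--             converted_param = param_name.replace("_", "-")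
--             converted_segments.append(f"{{{converted_param}}}")
--         else:
--             # Convert regular segments
--             converted_segments.append(segment.replace("_", "-"))
--
--     return "/".join(converted_segments)
-- ===== SOURCE B (Python) =====
-- def _convert_path(path: str) -> str:
--     # '/' contains no underscores, empty segments are unchanged, and replacing
--     # underscores inside {...} equals replacing them across the whole segment,
--     # so the split/loop/join collapses to one substitution.
--     return path.replace("_", "-")
-- ===== Notes on version B (the rewrite author's own statement) =====
-- stated objective: idiomatic
-- what changed: The split-into-segments loop with its empty-segment and {param} branches collapses to a single path.replace('_','-'), since '/' and braces contain no underscores.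
import Mathlib
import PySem

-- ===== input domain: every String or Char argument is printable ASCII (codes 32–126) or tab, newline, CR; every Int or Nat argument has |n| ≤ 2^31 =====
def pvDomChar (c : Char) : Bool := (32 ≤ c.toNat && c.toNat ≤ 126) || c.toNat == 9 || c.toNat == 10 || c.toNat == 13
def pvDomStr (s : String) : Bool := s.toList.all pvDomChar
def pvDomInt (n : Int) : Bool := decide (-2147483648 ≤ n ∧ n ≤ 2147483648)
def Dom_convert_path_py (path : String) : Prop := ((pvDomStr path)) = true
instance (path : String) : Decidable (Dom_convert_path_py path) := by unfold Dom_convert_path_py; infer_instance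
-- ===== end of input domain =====

-- B replaces A's split/segment-loop/join by a single substitution (idiomatic): '/' and braces contain no underscores, so the result is the same.

-- ===== PORT A =====
def convert_path_py (path : String) : String :=
  match PySem.Str.split? path "/" with
  | none => ""  -- unreachable: split raises only for an empty separator, ours is "/"
  | some segments =>
      let converted_segments := segments.foldl (fun acc segment =>
        if segment = "" then
          acc ++ [segment]
        else if PySem.Str.startswith segment "{" && PySem.Str.endswith segment "}" then
          let param_name := PySem.Str.slice segment (some 1) (some (-1))
          let converted_param := PySem.Str.replace param_name "_" "-"
          acc ++ ["{" ++ converted_param ++ "}"]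
        else
          acc ++ [PySem.Str.replace segment "_" "-"]) []
      PySem.Str.join "/" converted_segments

-- ===== PORT B =====
def convert_path_py_alt (path : String) : String :=
  PySem.Str.replace path "_" "-"

-- ===== PRECONDITION & SPEC =====
def Spec_convert_path_py (path : String) (out : String) : Prop := out = convert_path_py_alt path
instance (path : String) (out : String) : Decidable (Spec_convert_path_py path out) := by unfold Spec_convert_path_py; infer_instance

-- ===== CLAIM (what is proved, stated in full; the proofs are below) =====
def Claim_equal_convert_path_py : Prop := ∀ (path : String), Dom_convert_path_py path → Spec_convert_path_py path (convert_path_py path)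

-- ===== LEMMAS AND PROOFS =====

-- the character substitution both programs perform
def pvSub (c : Char) : Char := if c = '_' then '-' else c

-- A's per-segment transformation, as a named function
def pvBody (segment : String) : String :=
  if segment = "" then segment
  else if PySem.Str.startswith segment "{" && PySem.Str.endswith segment "}" then
    "{" ++ PySem.Str.replace (PySem.Str.slice segment (some 1) (some (-1))) "_" "-" ++ "}"
  else PySem.Str.replace segment "_" "-"

-- clean recursion equivalent to PySem.Chars.splitOn.go with separator "/"
def pvSplitAux : List Char → List Char → List (List Char)
  | [], cur => [cur.reverse]
  | c :: rest, cur => if c = '/' then cur.reverse :: pvSplitAux rest [] else pvSplitAux rest (c :: cur)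

lemma pvSplitAux_ne_nil (l cur : List Char) : pvSplitAux l cur ≠ [] := by
  induction l generalizing cur with
  | nil => simp [pvSplitAux]
  | cons c rest ih =>
      simp only [pvSplitAux]
      split_ifs <;> simp [ih]

lemma replace_go_eq_map (fuel : Nat) : ∀ (l acc : List Char), l.length ≤ fuel →
    PySem.Chars.replace.go ['_'] ['-'] fuel l acc = acc.reverse ++ l.map pvSub := by
  induction fuel with
  | zero =>
      intro l acc h
      have : l = [] := by cases l <;> simp_all
      subst this
      simp [PySem.Chars.replace.go]
  | succ n ih =>
      intro l acc h
      cases l with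
      | nil => simp [PySem.Chars.replace.go]
      | cons c rest =>
          simp only [PySem.Chars.replace.go]
          by_cases hc : c = '_'
          · subst hc
            simp only [List.isPrefixOf, BEq.rfl, Bool.and_self, if_true,
              List.length_cons, List.length_nil, Nat.zero_add, List.drop_succ_cons, List.drop_zero]
            rw [ih rest _ (by simpa using Nat.le_of_succ_le_succ h)]
            simp [pvSub]
          · have hp : List.isPrefixOf ['_'] (c :: rest) = false := by
              simp [List.isPrefixOf]
              intro h'; exact absurd h'.symm hc
            rw [hp]
            simp only [Bool.false_eq_true, if_false]
            rw [ih rest _ (by simpa using Nat.le_of_succ_le_succ h)]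
            simp [pvSub, hc]

lemma replace_eq_map (l : List Char) :
    PySem.Chars.replace l ['_'] ['-'] = l.map pvSub := by
  simp only [PySem.Chars.replace, List.isEmpty, Bool.false_eq_true, if_false]
  simpa using replace_go_eq_map l.length l [] le_rfl

lemma splitOn_go_eq (fuel : Nat) : ∀ (l cur : List Char) (acc : List (List Char)), l.length < fuel →
    PySem.Chars.splitOn.go ['/'] fuel l cur acc = acc.reverse ++ pvSplitAux l cur := by
  induction fuel with
  | zero => intro l cur acc h; omega
  | succ n ih =>
      intro l cur acc h
      cases l with
      | nil => simp [PySem.Chars.splitOn.go, pvSplitAux]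
      | cons c rest =>
          simp only [PySem.Chars.splitOn.go]
          by_cases hc : c = '/'
          · subst hc
            have hp : List.isPrefixOf ['/'] ('/' :: rest) = true := by
              simp [List.isPrefixOf]
            rw [hp]
            simp only [if_true, List.length_cons, List.length_nil, Nat.zero_add,
              List.drop_succ_cons, List.drop_zero]
            rw [ih rest [] _ (by simpa using Nat.lt_of_succ_lt_succ h)]
            simp [pvSplitAux]
          · have hp : List.isPrefixOf ['/'] (c :: rest) = false := by
              simp [List.isPrefixOf]
              intro h'; exact absurd h'.symm hc
            rw [hp]
            simp only [Bool.false_eq_true, if_false]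
            rw [ih rest (c :: cur) _ (by simpa using Nat.lt_of_succ_lt_succ h)]
            simp [pvSplitAux, hc]

lemma splitOn_eq (l : List Char) :
    PySem.Chars.splitOn l ['/'] = pvSplitAux l [] := by
  simpa using splitOn_go_eq (l.length + 1) l [] [] (by omega)

lemma join_map_splitAux (l : List Char) : ∀ cur : List Char,
    PySem.Chars.join ['/'] ((pvSplitAux l cur).map (List.map pvSub)) =
      (cur.reverse ++ l).map pvSub := by
  induction l with
  | nil =>
      intro cur
      simp [pvSplitAux, PySem.Chars.join_singleton]
  | cons c rest ih =>
      intro cur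
      by_cases hc : c = '/'
      · subst hc
        simp only [pvSplitAux, if_true]
        obtain ⟨s₀, ss, hss⟩ := List.exists_cons_of_ne_nil (pvSplitAux_ne_nil rest [])
        rw [hss, List.map_cons, List.map_cons, PySem.Chars.join_cons_cons, ← List.map_cons, ← hss, ih]
        simp [pvSub]
      · simp only [pvSplitAux, hc, if_false]
        rw [ih (c :: cur)]
        simp

lemma slice_one_neg_one (x y : Char) (xs : List Char) :
    PySem.List.slice (x :: (xs ++ [y])) (some 1) (some (-1)) = xs := by
  simp [PySem.List.slice, PySem.List.clampIdx]
  rw [if_neg (by omega)]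
  simp

-- A's per-segment value is the character substitution applied to the segment
lemma body_eq_map (l : List Char) :
    (pvBody (String.ofList l)).toList = l.map pvSub := by
  unfold pvBody
  by_cases hnil : l = []
  · simp [hnil]
  · have hne : String.ofList l ≠ "" := by
      simp [String.ext_iff]
      intro h; exact hnil (by simpa using h)
    rw [if_neg hne]
    by_cases hbr : PySem.Str.startswith (String.ofList l) "{" && PySem.Str.endswith (String.ofList l) "}"
    · rw [if_pos hbr]
      have hs : ['{'] <+: l := by
        have := (PySem.Chars.startswith_iff l ['{']).mp (by simpa using (Bool.and_elim_left hbr))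
        exact this
      have he : ['}'] <:+ l := by
        have := (PySem.Chars.endswith_iff l ['}']).mp (by simpa using (Bool.and_elim_right hbr))
        exact this
      obtain ⟨t, rfl⟩ := hs
      cases t using List.reverseRecOn with
      | nil =>
          obtain ⟨u, hu⟩ := he
          cases u with
          | nil => simp at hu
          | cons a u' => simp at hu
      | append_singleton mid last _ =>
          obtain ⟨u, hu⟩ := he
          have hlast : last = '}' := by
            have h2 := congrArg List.getLast? hu
            rw [List.getLast?_concat,
              show ['{'] ++ (mid ++ [last]) = ('{' :: mid) ++ [last] from by simp,
              List.getLast?_concat] at h2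
            exact (Option.some_inj.mp h2).symm
          subst hlast
          have hsl : PySem.Str.slice (String.ofList (['{'] ++ (mid ++ ['}']))) (some 1) (some (-1)) = String.ofList mid := by
            apply String.toList_inj.mp
            simpa [PySem.Str.slice] using slice_one_neg_one '{' '}' mid
          rw [hsl]
          simp [PySem.Str.toList_replace, replace_eq_map, pvSub]
    · rw [if_neg hbr]
      simp [PySem.Str.toList_replace, replace_eq_map]

lemma foldl_body (segs : List String) : ∀ acc : List String,
    segs.foldl (fun acc segment =>
        if segment = "" then
          acc ++ [segment]
        else if PySem.Str.startswith segment "{" && PySem.Str.endswith segment "}" then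
          let param_name := PySem.Str.slice segment (some 1) (some (-1))
          let converted_param := PySem.Str.replace param_name "_" "-"
          acc ++ ["{" ++ converted_param ++ "}"]
        else
          acc ++ [PySem.Str.replace segment "_" "-"]) acc = acc ++ segs.map pvBody := by
  induction segs with
  | nil => intro acc; simp
  | cons s rest ih =>
      intro acc
      simp only [List.foldl_cons, List.map_cons]
      rw [ih]
      unfold pvBody
      split_ifs <;> simp

-- ===== VERDICT (by name: the statement is the Claim_ definition above) =====
theorem convert_path_py_spec : Claim_equal_convert_path_py := by
  intro path _
  unfold Spec_convert_path_py convert_path_py convert_path_py_alt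
  have hsplit : PySem.Str.split? path "/" =
      some ((pvSplitAux path.toList []).map String.ofList) := by
    simp [PySem.Str.split?, PySem.Chars.split?, splitOn_eq]
  rw [hsplit]
  simp only [foldl_body, List.nil_append, List.map_map]
  apply String.toList_inj.mp
  rw [PySem.Str.toList_join, PySem.Str.toList_replace]
  have : ((pvSplitAux path.toList []).map (pvBody ∘ String.ofList)).map String.toList =
      (pvSplitAux path.toList []).map (List.map pvSub) := by
    rw [List.map_map]
    apply List.map_congr_left
    intro seg _
    simpa using body_eq_map seg
  rw [this]
  have hj := join_map_splitAux path.toList []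
  simp only [List.reverse_nil, List.nil_append] at hj
  simpa [replace_eq_map] using hj
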